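-- pv_equiv track=rewrite | github.com/JonSteinn/Kattis-Solutions | src/Kutevi/Python 3/main.py | find_all_possible
-- ===== SOURCE A (Python) =====
-- from collections import deque
-- from itertools import combinations as C
--
-- def find_all_possible(known):
--     possible = [False]*360
--     for x in known:
--         possible[x] = True
--
--     stack = deque()
--     for a1 in known.copy():
--         a2 = a1
--         for a in [(360+a1-a2)%360, (360+a2-a1)%360, (a1+a2) % 360]:
--             if not possible[a]:
--                 stack.append(a)
--                 known.add(a)
--                 possible[a] = True
--     for a1,a2 in C(known,2):
--         for a in [(360+a1-a2)%360, (360+a2-a1)%360, (a1+a2) % 360]: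
--             if not possible[a]:
--                 stack.append(a)
--                 known.add(a)
--                 possible[a] = True
--
--     while stack:
--         a1 = stack.pop()
--         a2 = a1
--         for a in [(360+a1-a2)%360, (360+a2-a1)%360, (a1+a2) % 360]:
--             if not possible[a]:
--                 stack.append(a)
--                 known.add(a)
--                 possible[a] = True
--         for a2 in known.copy():
--             for a in [(360+a1-a2)%360, (360+a2-a1)%360, (a1+a2) % 360]:
--                 if not possible[a]:
--                     stack.append(a)
--                     known.add(a)
--                     possible[a] = True
--     return possible
-- ===== SOURCE B (Python) =====
-- def _gcd(a, b):
--     while b: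
--         a, b = b, a % b
--     return a
--
-- def find_all_possible(known):
--     g = 360
--     for x in known:
--         g = _gcd(g, x % 360)
--     if not known:
--         return [False] * 360
--     return [i % g == 0 for i in range(360)]
-- ===== Notes on version B (the rewrite author's own statement) =====
-- stated objective: faster
-- what changed: A computes the closure of the angle set under a+b/a-b mod 360 with a worklist (stack) plus pairwise combination passes; B replaces the whole closure search by number theory: the closure is exactly the multiples of g = gcd(360, all angles mod 360), so B folds gcd over the input once and emits [i % g == 0 for i in range(360)] (all-False for empty input).
import Mathlib
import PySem

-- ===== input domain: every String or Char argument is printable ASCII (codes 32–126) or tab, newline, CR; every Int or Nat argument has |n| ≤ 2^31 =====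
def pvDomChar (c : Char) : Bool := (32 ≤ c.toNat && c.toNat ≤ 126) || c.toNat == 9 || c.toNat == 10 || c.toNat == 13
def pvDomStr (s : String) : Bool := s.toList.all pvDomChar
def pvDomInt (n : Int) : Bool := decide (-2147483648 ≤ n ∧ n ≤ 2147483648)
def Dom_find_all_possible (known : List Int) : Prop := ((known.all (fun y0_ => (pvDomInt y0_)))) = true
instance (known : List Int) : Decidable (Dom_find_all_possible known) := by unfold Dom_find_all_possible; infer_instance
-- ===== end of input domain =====

-- B replaces A's worklist closure of the angle set under ±/+ mod 360 by its number-theoretic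
-- characterisation (multiples of gcd(360, angles mod 360)); A also mutates its argument set in
-- place (adds the closure elements) — the equivalence proved here is about the RETURN value only.


-- ===== PORT A =====
-- the three candidate angles [(360+a1-a2)%360, (360+a2-a1)%360, (a1+a2)%360]
def combosA (a1 a2 : Int) : List Int :=
  [PySem.Int.mod (360 + a1 - a2) 360, PySem.Int.mod (360 + a2 - a1) 360, PySem.Int.mod (a1 + a2) 360]

-- state: (possible, stack, known); stack head = Python deque's right end (append/pop site).
-- `if not possible[a]: stack.append(a); known.add(a); possible[a] = True`.  The `a.toNat < length`
-- conjunct only makes the list update total; every `a` fed to tryAdd is a `% 360` value in [0,360)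
-- and the list has length 360, so the conjunct is always true (Python indexes `possible[a]` directly).
def tryAdd (s : List Bool × List Int × List Int) (a : Int) : List Bool × List Int × List Int :=
  if a.toNat < s.1.length ∧ s.1.getD a.toNat false = false then
    (s.1.set a.toNat true, a :: s.2.1, s.2.2 ++ [a])
  else s

-- `for a in [(360+a1-a2)%360, (360+a2-a1)%360, (a1+a2)%360]: if not possible[a]: …`
def procPair (s : List Bool × List Int × List Int) (a1 a2 : Int) : List Bool × List Int × List Int :=
  (combosA a1 a2).foldl tryAdd s

-- itertools.combinations(known, 2)
def pairs2 : List Int → List (Int × Int)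
  | [] => []
  | x :: xs => xs.map (fun y => (x, y)) ++ pairs2 xs

-- termination measure for the while loop: each tryAdd push flips a possible[] bit False→True
def muA (s : List Bool × List Int × List Int) : Nat := s.2.1.length + 2 * s.1.count false

theorem tryAdd_mu (s : List Bool × List Int × List Int) (a : Int) : muA (tryAdd s a) ≤ muA s := by
  unfold tryAdd muA
  split
  · rename_i h
    obtain ⟨hlt, hfalse⟩ := h
    have hgf : s.1[a.toNat] = false := by rw [← List.getD_eq_getElem s.1 false hlt]; exact hfalse
    have hset := List.count_set (a := true) (b := false) (l := s.1) (i := a.toNat) hlt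
    have hpos : 0 < s.1.count false := by
      refine List.count_pos_iff.mpr ?_
      rw [← hgf]; exact List.getElem_mem hlt
    simp [hgf] at hset
    simp only [List.length_cons]
    omega
  · exact le_refl _

theorem foldl_tryAdd_mu (l : List Int) (s : List Bool × List Int × List Int) :
    muA (l.foldl tryAdd s) ≤ muA s := by
  induction l generalizing s with
  | nil => exact le_refl _
  | cons a l ih => exact le_trans (ih _) (tryAdd_mu s a)

theorem foldl_procPair_mu (l : List Int) (a1 : Int) (s : List Bool × List Int × List Int) :
    muA (l.foldl (fun s a2 => procPair s a1 a2) s) ≤ muA s := by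
  induction l generalizing s with
  | nil => exact le_refl _
  | cons a l ih => exact le_trans (ih _) (foldl_tryAdd_mu _ s)

-- `while stack: a1 = stack.pop(); …(a2 = a1 triple)…; for a2 in known.copy(): …`
set_option maxHeartbeats 1600000 in
def loopA : List Bool × List Int × List Int → List Bool
  | (p, [], _) => p
  | (p, a1 :: rest, kn) =>
      let s1 := procPair (p, rest, kn) a1 a1
      let s2 := s1.2.2.foldl (fun s a2 => procPair s a1 a2) s1
      loopA s2
termination_by s => muA s
decreasing_by
  have h1 : muA (List.foldl (fun s a2 => procPair s a1 a2) (procPair (p, rest, kn) a1 a1)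
      (procPair (p, rest, kn) a1 a1).2.2) ≤ muA (procPair (p, rest, kn) a1 a1) :=
    foldl_procPair_mu _ a1 _
  have h2 : muA (procPair (p, rest, kn) a1 a1) ≤ muA (p, rest, kn) :=
    foldl_tryAdd_mu (combosA a1 a1) (p, rest, kn)
  have h3 : muA (p, a1 :: rest, kn) = muA (p, rest, kn) + 1 := by simp [muA]; omega
  omega

def find_all_possible (known : List Int) : List Bool :=
  -- possible[x] = True : Python indexes the 360-list with x (a negative x wraps around); under
  -- Pre_ (-360 ≤ x < 360) that index is exactly x % 360; outside Pre_ Python raises IndexError.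
  let p0 := known.foldl (fun p x => p.set (PySem.Int.mod x 360).toNat true) (List.replicate 360 false)
  let s1 := known.foldl (fun s a1 => procPair s a1 a1) (p0, ([], known))
  let s2 := (pairs2 s1.2.2).foldl (fun s pr => procPair s pr.1 pr.2) s1
  loopA s2

-- ===== PORT B =====
-- Source B's hand-written Euclid: while b: a, b = b, a % b
def pyGcd (a b : Nat) : Nat :=
  if b = 0 then a else pyGcd b (a % b)
termination_by b
decreasing_by exact Nat.mod_lt _ (by omega)

def find_all_possible_alt (known : List Int) : List Bool :=
  let g := known.foldl (fun g x => pyGcd g ((PySem.Int.mod x 360).toNat)) 360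
  if known.isEmpty then List.replicate 360 false
  else (List.range 360).map (fun i => decide (i % g = 0))

-- ===== PRECONDITION & SPEC =====
-- Pre_ excludes exactly the inputs where Python A raises IndexError: an element < -360 or ≥ 360
-- makes `possible[x] = True` index outside the 360-element list.
def Pre_find_all_possible (known : List Int) : Prop := ∀ x ∈ known, -360 ≤ x ∧ x < 360
instance (known : List Int) : Decidable (Pre_find_all_possible known) := by
  unfold Pre_find_all_possible; infer_instance
def pvWitness_find_all_possible : List Int := [90, -5]

def Spec_find_all_possible (known : List Int) (out : List Bool) : Prop := out = find_all_possible_alt known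
instance (known : List Int) (out : List Bool) : Decidable (Spec_find_all_possible known out) := by
  unfold Spec_find_all_possible; infer_instance

-- ===== CLAIM (what is proved, stated in full; the proofs are below) =====
def Claim_equal_find_all_possible : Prop := ∀ (known : List Int), Dom_find_all_possible known → Pre_find_all_possible known → Spec_find_all_possible known (find_all_possible known)

-- ===== LEMMAS AND PROOFS =====

-- ---- abbreviations used only by the proofs ----
def isMarked (p : List Bool) (i : Nat) : Prop := p.getD i false = true
def rN (x : Int) : Nat := (PySem.Int.mod x 360).toNat
def gK (known : List Int) : Nat := known.foldl (fun g x => pyGcd g ((PySem.Int.mod x 360).toNat)) 360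

theorem mod360 (x : Int) : PySem.Int.mod x 360 = x % 360 :=
  PySem.Int.mod_eq_emod_of_pos (by norm_num)

theorem rN_cast (x : Int) : (rN x : Int) = x % 360 := by
  simp [rN, mod360]
  exact Int.emod_nonneg x (by norm_num)

theorem rN_lt (x : Int) : rN x < 360 := by
  have h := Int.emod_lt_of_pos x (b := 360) (by norm_num)
  have h2 := rN_cast x
  omega

theorem rN_self {a : Int} (h0 : 0 ≤ a) (h : a < 360) : (rN a : Int) = a := by
  rw [rN_cast, Int.emod_eq_of_lt h0 h]

-- emod arithmetic used to normalise combo values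
theorem emod_add_absorb_left (t u : Int) : (t % 360 + u) % 360 = (t + u) % 360 := by
  rw [Int.add_emod, Int.emod_emod_of_dvd _ dvd_rfl, ← Int.add_emod]
theorem emod_add_absorb_right (t u : Int) : (t + u % 360) % 360 = (t + u) % 360 := by
  rw [Int.add_emod, Int.emod_emod_of_dvd _ dvd_rfl, ← Int.add_emod]
theorem emod_sub_absorb_left (t u : Int) : (t % 360 - u) % 360 = (t - u) % 360 := by
  rw [Int.sub_emod, Int.emod_emod_of_dvd _ dvd_rfl, ← Int.sub_emod]
theorem emod_sub_absorb_right (t u : Int) : (t - u % 360) % 360 = (t - u) % 360 := by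
  rw [Int.sub_emod, Int.emod_emod_of_dvd _ dvd_rfl, ← Int.sub_emod]
theorem emod_add360 (t : Int) : (360 + t) % 360 = t % 360 := by
  rw [add_comm, Int.add_emod_right]

theorem combosA_res (a b : Int) : combosA a b = combosA (a % 360) (b % 360) := by
  simp only [combosA, mod360, List.cons.injEq, and_true]
  refine ⟨?_, ?_, ?_⟩
  · rw [show (360:Int) + a % 360 - b % 360 = 360 + (a % 360 - b % 360) by ring,
        emod_add360, emod_sub_absorb_left, emod_sub_absorb_right,
        show (360:Int) + a - b = 360 + (a - b) by ring, emod_add360]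
  · rw [show (360:Int) + b % 360 - a % 360 = 360 + (b % 360 - a % 360) by ring,
        emod_add360, emod_sub_absorb_left, emod_sub_absorb_right,
        show (360:Int) + b - a = 360 + (b - a) by ring, emod_add360]
  · rw [emod_add_absorb_left, emod_add_absorb_right]

theorem combosA_mem_bounds {a b c : Int} (h : c ∈ combosA a b) : 0 ≤ c ∧ c < 360 := by
  simp only [combosA, mod360, List.mem_cons, List.mem_singleton, List.not_mem_nil, or_false] at h
  rcases h with h | h | h <;> subst h <;>
    exact ⟨Int.emod_nonneg _ (by norm_num), Int.emod_lt_of_pos _ (by norm_num)⟩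

theorem combosA_comm {a b c : Int} (h : c ∈ combosA a b) : c ∈ combosA b a := by
  simp only [combosA, mod360, List.mem_cons, List.mem_singleton, List.not_mem_nil, or_false] at h ⊢
  rcases h with h | h | h
  · right; left; exact h
  · left; exact h
  · right; right; rw [h, add_comm]

theorem dvd_emod360 {g x : Int} (h360 : g ∣ 360) (hx : g ∣ x) : g ∣ x % 360 := by
  rw [Int.emod_def]
  exact dvd_sub hx (Dvd.dvd.mul_right h360 _)

theorem combosA_dvd {g a b : Int} (h360 : g ∣ 360) (ha : g ∣ a % 360) (hb : g ∣ b % 360) :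
    ∀ c ∈ combosA a b, g ∣ c := by
  intro c hc
  rw [combosA_res] at hc
  simp only [combosA, mod360, List.mem_cons, List.mem_singleton, List.not_mem_nil, or_false] at hc
  rcases hc with h | h | h <;> subst h <;>
    exact dvd_emod360 h360 (by first
      | exact dvd_add (dvd_add h360 ha) (dvd_neg.mpr hb)
      | exact dvd_add (dvd_add h360 hb) (dvd_neg.mpr ha)
      | exact dvd_add ha hb)

theorem getD_set_true (p : List Bool) (j i : Nat) :
    (p.set j true).getD i false = if j = i ∧ j < p.length then true else p.getD i false := by
  rw [List.getD_eq_getElem?_getD, List.getD_eq_getElem?_getD, List.getElem?_set]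
  by_cases hji : j = i
  · subst hji
    by_cases hlen : j < p.length
    · simp [hlen]
    · simp [hlen, List.getElem?_eq_none (by omega : p.length ≤ j)]
  · simp [hji]

-- ---- invariants ----

def ExtS (s s' : List Bool × List Int × List Int) : Prop :=
  (∀ i : Nat, isMarked s.1 i → isMarked s'.1 i) ∧
  (∀ b ∈ s.2.1, b ∈ s'.2.1) ∧
  (∀ a ∈ s.2.2, a ∈ s'.2.2) ∧
  (∀ i : Nat, isMarked s'.1 i → ¬ isMarked s.1 i → (i : Int) ∈ s'.2.1)

theorem ExtS_refl (s : List Bool × List Int × List Int) : ExtS s s :=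
  ⟨fun _ h => h, fun _ h => h, fun _ h => h, fun _ h hn => absurd h hn⟩

theorem ExtS_trans {s t u : List Bool × List Int × List Int} (h1 : ExtS s t) (h2 : ExtS t u) : ExtS s u := by
  obtain ⟨m1, st1, kn1, new1⟩ := h1
  obtain ⟨m2, st2, kn2, new2⟩ := h2
  refine ⟨fun i h => m2 i (m1 i h), fun b h => st2 b (st1 b h), fun a h => kn2 a (kn1 a h), ?_⟩
  intro i hu hs
  by_cases ht : isMarked t.1 i
  · exact st2 _ (new1 i ht hs)
  · exact new2 i hu ht

structure PreInv (known : List Int) (s : List Bool × List Int × List Int) : Prop where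
  len : s.1.length = 360
  marks : ∀ i, i < 360 → (isMarked s.1 i ↔ ∃ a ∈ s.2.2, rN a = i)
  stRange : ∀ a ∈ s.2.1, 0 ≤ a ∧ a < 360
  stMark : ∀ a ∈ s.2.1, isMarked s.1 a.toNat
  sound : ∀ a ∈ s.2.2, (gK known : Int) ∣ a % 360
  nodup : s.2.1.Nodup
  orig : ∀ x ∈ known, x ∈ s.2.2

def ClosedS (p : List Bool) (st : List Int) : Prop :=
  ∀ u v : Nat, u < 360 → v < 360 → isMarked p u → isMarked p v →
    ((u : Int) ∉ st) → ((v : Int) ∉ st) → ∀ c ∈ combosA u v, isMarked p c.toNat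

def InvC (known : List Int) (s : List Bool × List Int × List Int) : Prop :=
  PreInv known s ∧ ClosedS s.1 s.2.1


-- ---- gcd fold facts ----
theorem pyGcd_eq : ∀ b a : Nat, pyGcd a b = Nat.gcd a b := by
  intro b
  induction b using Nat.strong_induction_on with
  | _ b ih =>
    intro a
    rw [pyGcd]
    by_cases hb : b = 0
    · simp [hb]
    · rw [if_neg hb, ih (a % b) (Nat.mod_lt _ (Nat.pos_of_ne_zero hb)) b,
          Nat.gcd_comm b (a % b), ← Nat.gcd_rec b a, Nat.gcd_comm b a]

theorem gK_eq (known : List Int) : gK known = known.foldl (fun g x => Nat.gcd g (rN x)) 360 := by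
  unfold gK
  generalize (360 : Nat) = a
  induction known generalizing a with
  | nil => rfl
  | cons x l ih => simp only [List.foldl_cons, pyGcd_eq, rN]

theorem gfold_dvd_seed : ∀ (l : List Int) (a : Nat), (l.foldl (fun g x => Nat.gcd g (rN x)) a) ∣ a := by
  intro l
  induction l with
  | nil => exact fun a => dvd_refl a
  | cons x l ih => exact fun a => dvd_trans (ih _) (Nat.gcd_dvd_left _ _)

theorem gfold_dvd_mem : ∀ (l : List Int) (a : Nat) (x : Int), x ∈ l →
    (l.foldl (fun g x => Nat.gcd g (rN x)) a) ∣ rN x := by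
  intro l
  induction l with
  | nil => intro a x hx; simp at hx
  | cons y l ih =>
    intro a x hx
    rcases List.mem_cons.mp hx with h | h
    · subst h; exact dvd_trans (gfold_dvd_seed l _) (Nat.gcd_dvd_right _ _)
    · exact ih _ x h

theorem gK_dvd_360 (known : List Int) : (gK known : Int) ∣ 360 := by
  have h : gK known ∣ 360 := by rw [gK_eq]; exact gfold_dvd_seed known 360
  exact_mod_cast Int.natCast_dvd_natCast.mpr h

theorem gK_dvd_mem {known : List Int} {x : Int} (hx : x ∈ known) : gK known ∣ rN x := by
  rw [gK_eq]; exact gfold_dvd_mem known 360 x hx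

theorem isMarked_dvd {known s i} (hp : PreInv known s) (hi : i < 360) (hm : isMarked s.1 i) :
    (gK known : Int) ∣ (i : Int) := by
  obtain ⟨a, ha, hr⟩ := (hp.marks i hi).mp hm
  have := hp.sound a ha
  rw [← rN_cast, hr] at this
  exact this

theorem st_dvd {known s a} (hp : PreInv known s) (ha : a ∈ s.2.1) : (gK known : Int) ∣ a % 360 := by
  obtain ⟨h0, hlt⟩ := hp.stRange a ha
  have := isMarked_dvd hp (by omega : a.toNat < 360) (hp.stMark a ha)
  rw [Int.toNat_of_nonneg h0] at this
  rwa [Int.emod_eq_of_lt h0 hlt]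

theorem tryAdd_pre {known s a} (hp : PreInv known s) (h0 : 0 ≤ a) (hlt : a < 360)
    (hdvd : (gK known : Int) ∣ a) :
    PreInv known (tryAdd s a) ∧ ExtS s (tryAdd s a) ∧ isMarked (tryAdd s a).1 a.toNat := by
  obtain ⟨p, st, kn⟩ := s
  have hcast : ((a.toNat : Int)) = a := Int.toNat_of_nonneg h0
  have hlen360 : p.length = 360 := hp.len
  have hrNa : rN a = a.toNat := by
    have h1 := rN_self h0 hlt
    omega
  unfold tryAdd
  split
  · rename_i h
    obtain ⟨hlen, hfalse⟩ := h
    simp only at hlen hfalse ⊢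
    have hm : ∀ i, isMarked (p.set a.toNat true) i ↔ (i = a.toNat ∨ isMarked p i) := by
      intro i
      unfold isMarked
      rw [getD_set_true]
      by_cases hia : a.toNat = i
      · simp [hia, hia ▸ hlen]
      · simp [hia, show i ≠ a.toNat from fun h => hia h.symm]
    refine ⟨?_, ?_, ?_⟩
    · refine ⟨by simpa using hlen360, ?_, ?_, ?_, ?_, ?_, ?_⟩
      · intro i hi
        rw [hm]
        constructor
        · rintro (h | h)
          · exact ⟨a, by simp, by rw [hrNa, h]⟩
          · obtain ⟨b, hb, hr⟩ := (hp.marks i hi).mp h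
            exact ⟨b, by simp [hb], hr⟩
        · rintro ⟨b, hb, hr⟩
          rcases List.mem_append.mp hb with hbk | hba
          · exact Or.inr ((hp.marks i hi).mpr ⟨b, hbk, hr⟩)
          · simp at hba
            subst hba
            exact Or.inl (by rw [← hr, hrNa])
      · intro b hb
        rcases List.mem_cons.mp hb with h | h
        · subst h; exact ⟨h0, hlt⟩
        · exact hp.stRange b h
      · intro b hb
        rcases List.mem_cons.mp hb with h | h
        · subst h; exact (hm _).mpr (Or.inl rfl)
        · exact (hm _).mpr (Or.inr (hp.stMark b h))
      · intro b hb
        rcases List.mem_append.mp hb with h | h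
        · exact hp.sound b h
        · simp at h
          subst h
          rw [Int.emod_eq_of_lt h0 hlt]
          exact hdvd
      · refine List.nodup_cons.mpr ⟨?_, hp.nodup⟩
        intro ha
        have := hp.stMark a ha
        unfold isMarked at this
        rw [hfalse] at this
        exact Bool.false_ne_true this
      · intro x hx
        exact List.mem_append.mpr (Or.inl (hp.orig x hx))
    · refine ⟨fun i h => (hm i).mpr (Or.inr h), fun b hb => List.mem_cons_of_mem _ hb,
        fun x hx => List.mem_append.mpr (Or.inl hx), ?_⟩
      intro i hi hni
      rcases (hm i).mp hi with h | h
      · subst h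
        rw [show ((a.toNat : Int)) = a from hcast]
        exact List.mem_cons_self ..
      · exact absurd h hni
    · exact (hm _).mpr (Or.inl rfl)
  · rename_i h
    have hA : a.toNat < p.length := by omega
    have hT : p.getD a.toNat false = true := by
      cases hb : p.getD a.toNat false
      · exact absurd ⟨hA, hb⟩ h
      · rfl
    exact ⟨hp, ExtS_refl _, hT⟩

theorem foldl_tryAdd_pre {known} (cs : List Int) {s} (hp : PreInv known s)
    (hcs : ∀ c ∈ cs, 0 ≤ c ∧ c < 360 ∧ (gK known : Int) ∣ c) :
    PreInv known (cs.foldl tryAdd s) ∧ ExtS s (cs.foldl tryAdd s) ∧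
      ∀ c ∈ cs, isMarked (cs.foldl tryAdd s).1 c.toNat := by
  induction cs generalizing s with
  | nil => exact ⟨hp, ExtS_refl s, by simp⟩
  | cons c cs ih =>
    obtain ⟨hb0, hb1, hbd⟩ := hcs c (List.mem_cons_self ..)
    obtain ⟨hp1, he1, hm1⟩ := tryAdd_pre hp hb0 hb1 hbd
    obtain ⟨hp2, he2, hm2⟩ := ih hp1 (fun d hd => hcs d (List.mem_cons_of_mem _ hd))
    refine ⟨hp2, ExtS_trans he1 he2, ?_⟩
    intro d hd
    rcases List.mem_cons.mp hd with h | h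
    · subst h; exact he2.1 _ hm1
    · exact hm2 d h

theorem procPair_pre {known s a1 a2} (hp : PreInv known s)
    (h1 : (gK known : Int) ∣ a1 % 360) (h2 : (gK known : Int) ∣ a2 % 360) :
    PreInv known (procPair s a1 a2) ∧ ExtS s (procPair s a1 a2) ∧
      ∀ c ∈ combosA a1 a2, isMarked (procPair s a1 a2).1 c.toNat := by
  have h360 : (gK known : Int) ∣ 360 := gK_dvd_360 known
  exact foldl_tryAdd_pre _ hp (fun c hc =>
    ⟨(combosA_mem_bounds hc).1, (combosA_mem_bounds hc).2, combosA_dvd h360 h1 h2 c hc⟩)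

theorem foldl_snap_pre {known} (snap : List Int) {a1 s} (hp : PreInv known s)
    (hsnap : ∀ a2 ∈ snap, a2 ∈ s.2.2) (h1 : (gK known : Int) ∣ a1 % 360) :
    PreInv known (snap.foldl (fun s a2 => procPair s a1 a2) s) ∧
    ExtS s (snap.foldl (fun s a2 => procPair s a1 a2) s) ∧
    ∀ a2 ∈ snap, ∀ c ∈ combosA a1 a2,
      isMarked (snap.foldl (fun s a2 => procPair s a1 a2) s).1 c.toNat := by
  induction snap generalizing s with
  | nil => exact ⟨hp, ExtS_refl s, by simp⟩
  | cons a2 snap ih =>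
    obtain ⟨hp1, he1, hm1⟩ := procPair_pre hp h1 (hp.sound a2 (hsnap a2 (List.mem_cons_self ..)))
    obtain ⟨hp2, he2, hm2⟩ := ih hp1
      (fun b hb => he1.2.2.1 b (hsnap b (List.mem_cons_of_mem _ hb)))
    refine ⟨hp2, ExtS_trans he1 he2, ?_⟩
    intro b hb c hc
    rcases List.mem_cons.mp hb with h | h
    · subst h; exact he2.1 _ (hm1 c hc)
    · exact hm2 b h c hc

theorem foldl_diag_pre {known} (l : List Int) {s} (hp : PreInv known s)
    (hl : ∀ a ∈ l, a ∈ s.2.2) :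
    PreInv known (l.foldl (fun s a1 => procPair s a1 a1) s) ∧
    ExtS s (l.foldl (fun s a1 => procPair s a1 a1) s) ∧
    ∀ a ∈ l, ∀ c ∈ combosA a a, isMarked (l.foldl (fun s a1 => procPair s a1 a1) s).1 c.toNat := by
  induction l generalizing s with
  | nil => exact ⟨hp, ExtS_refl s, by simp⟩
  | cons a l ih =>
    have hd := hp.sound a (hl a (List.mem_cons_self ..))
    obtain ⟨hp1, he1, hm1⟩ := procPair_pre hp hd hd
    obtain ⟨hp2, he2, hm2⟩ := ih hp1 (fun b hb => he1.2.2.1 b (hl b (List.mem_cons_of_mem _ hb)))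
    refine ⟨hp2, ExtS_trans he1 he2, ?_⟩
    intro b hb c hc
    rcases List.mem_cons.mp hb with h | h
    · subst h; exact he2.1 _ (hm1 c hc)
    · exact hm2 b h c hc

theorem foldl_pairs_pre {known} (prs : List (Int × Int)) {s} (hp : PreInv known s)
    (hl : ∀ pr ∈ prs, pr.1 ∈ s.2.2 ∧ pr.2 ∈ s.2.2) :
    PreInv known (prs.foldl (fun s pr => procPair s pr.1 pr.2) s) ∧
    ExtS s (prs.foldl (fun s pr => procPair s pr.1 pr.2) s) ∧
    ∀ pr ∈ prs, ∀ c ∈ combosA pr.1 pr.2,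
      isMarked (prs.foldl (fun s pr => procPair s pr.1 pr.2) s).1 c.toNat := by
  induction prs generalizing s with
  | nil => exact ⟨hp, ExtS_refl s, by simp⟩
  | cons pr prs ih =>
    obtain ⟨hx, hy⟩ := hl pr (List.mem_cons_self ..)
    obtain ⟨hp1, he1, hm1⟩ := procPair_pre hp (hp.sound _ hx) (hp.sound _ hy)
    obtain ⟨hp2, he2, hm2⟩ := ih hp1
      (fun q hq => ⟨he1.2.2.1 _ (hl q (List.mem_cons_of_mem _ hq)).1,
                    he1.2.2.1 _ (hl q (List.mem_cons_of_mem _ hq)).2⟩)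
    refine ⟨hp2, ExtS_trans he1 he2, ?_⟩
    intro q hq c hc
    rcases List.mem_cons.mp hq with h | h
    · subst h; exact he2.1 _ (hm1 c hc)
    · exact hm2 q h c hc


-- ---- the worklist loop preserves the invariant and ends closed ----

theorem loopA_inv {known : List Int} : ∀ s, InvC known s → ∃ kn', InvC known (loopA s, ([], kn')) := by
  intro s
  induction s using loopA.induct with
  | case1 p kn =>
    intro h
    exact ⟨kn, by rwa [show loopA (p, [], kn) = p from by rw [loopA]]⟩
  | case2 p a1 rest kn s1 s2 ih =>
    intro h
    obtain ⟨hp, hcl⟩ := h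
    have hp0 : PreInv known (p, rest, kn) := by
      refine ⟨hp.len, hp.marks, ?_, ?_, hp.sound, hp.nodup.of_cons, hp.orig⟩
      · exact fun b hb => hp.stRange b (List.mem_cons_of_mem _ hb)
      · exact fun b hb => hp.stMark b (List.mem_cons_of_mem _ hb)
    have ha1mem : a1 ∈ a1 :: rest := List.mem_cons_self ..
    have hd1 : (gK known : Int) ∣ a1 % 360 := st_dvd hp ha1mem
    have ha1R := hp.stRange a1 ha1mem
    obtain ⟨hp1, he1, hm1⟩ := procPair_pre (a1 := a1) (a2 := a1) hp0 hd1 hd1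
    have hp1' : PreInv known s1 := hp1
    have he1' : ExtS (p, rest, kn) s1 := he1
    have hm1' : ∀ c ∈ combosA a1 a1, isMarked s1.1 c.toNat := hm1
    obtain ⟨hp2, he2, hm2⟩ := foldl_snap_pre s1.2.2 (a1 := a1) hp1' (fun a2 h => h) hd1
    have hp2' : PreInv known s2 := hp2
    have he2' : ExtS s1 s2 := he2
    have hm2' : ∀ a2 ∈ s1.2.2, ∀ c ∈ combosA a1 a2, isMarked s2.1 c.toNat := hm2
    clear hp1 he1 hm1 hp2 he2 hm2
    have heAll : ExtS (p, rest, kn) s2 := ExtS_trans he1' he2'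
    have hclosed : ClosedS s2.1 s2.2.1 := by
      intro u v hu hv hmu hmv hnu hnv c hc
      by_cases hmu0 : isMarked p u
      · by_cases hmv0 : isMarked p v
        · by_cases hua : (u : Int) = a1
          · have hmv1 : isMarked s1.1 v := by
              by_contra hne
              exact hnv (he2'.2.2.2 v hmv hne)
            obtain ⟨y, hy, hry⟩ := (hp1'.marks v hv).mp hmv1
            have hE : combosA a1 y = combosA (u : Int) (v : Int) := by
              rw [combosA_res a1 y, combosA_res (u : Int) (v : Int), hua, ← hry, rN_cast,
                Int.emod_emod_of_dvd _ dvd_rfl]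
            rw [← hE] at hc
            exact hm2' y hy c hc
          · by_cases hva : (v : Int) = a1
            · have hmu1 : isMarked s1.1 u := by
                by_contra hne
                exact hnu (he2'.2.2.2 u hmu hne)
              obtain ⟨y, hy, hry⟩ := (hp1'.marks u hu).mp hmu1
              have hcc : c ∈ combosA (v : Int) (u : Int) := combosA_comm hc
              have hE : combosA a1 y = combosA (v : Int) (u : Int) := by
                rw [combosA_res a1 y, combosA_res (v : Int) (u : Int), hva, ← hry, rN_cast,
                  Int.emod_emod_of_dvd _ dvd_rfl]
              rw [← hE] at hcc
              exact hm2' y hy c hcc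
            · have hnu0 : (u : Int) ∉ a1 :: rest := by
                intro hmem
                rcases List.mem_cons.mp hmem with h | h
                · exact hua h
                · exact hnu (heAll.2.1 _ h)
              have hnv0 : (v : Int) ∉ a1 :: rest := by
                intro hmem
                rcases List.mem_cons.mp hmem with h | h
                · exact hva h
                · exact hnv (heAll.2.1 _ h)
              exact heAll.1 c.toNat (hcl u v hu hv hmu0 hmv0 hnu0 hnv0 c hc)
        · exact absurd (heAll.2.2.2 v hmv hmv0) hnv
      · exact absurd (heAll.2.2.2 u hmu hmu0) hnu
    obtain ⟨kn', hfin⟩ := ih ⟨hp2', hclosed⟩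
    refine ⟨kn', ?_⟩
    rwa [show loopA (p, a1 :: rest, kn) = loopA s2 from by rw [loopA]]

-- ---- the initial phases establish the invariant ----

def p0F (known : List Int) : List Bool :=
  known.foldl (fun p x => p.set (PySem.Int.mod x 360).toNat true) (List.replicate 360 false)
def s1F (known : List Int) : List Bool × List Int × List Int :=
  known.foldl (fun s a1 => procPair s a1 a1) (p0F known, ([], known))
def s2F (known : List Int) : List Bool × List Int × List Int :=
  (pairs2 (s1F known).2.2).foldl (fun s pr => procPair s pr.1 pr.2) (s1F known)

theorem find_eq (known : List Int) : find_all_possible known = loopA (s2F known) := rfl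

theorem marked_replicate (i : Nat) : ¬ isMarked (List.replicate 360 false) i := by
  unfold isMarked
  rw [List.getD_eq_getElem?_getD, List.getElem?_replicate]
  split <;> simp

theorem phase0_marks_aux : ∀ (l : List Int) (p : List Bool), p.length = 360 →
    (l.foldl (fun p x => p.set (PySem.Int.mod x 360).toNat true) p).length = 360 ∧
    ∀ i, isMarked (l.foldl (fun p x => p.set (PySem.Int.mod x 360).toNat true) p) i ↔
      (isMarked p i ∨ ∃ x ∈ l, rN x = i) := by
  intro l
  induction l with
  | nil =>
    intro p hl
    exact ⟨hl, fun i => by simp⟩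
  | cons x l ih =>
    intro p hl
    obtain ⟨hlen, hiff⟩ := ih (p.set (PySem.Int.mod x 360).toNat true) (by simpa using hl)
    refine ⟨hlen, fun i => ?_⟩
    rw [List.foldl_cons, hiff i]
    have hset : isMarked (p.set (PySem.Int.mod x 360).toNat true) i ↔ (i = rN x ∨ isMarked p i) := by
      unfold isMarked
      rw [show (PySem.Int.mod x 360).toNat = rN x from rfl, getD_set_true]
      by_cases hix : rN x = i
      · rw [if_pos ⟨hix, by rw [hl]; exact rN_lt x⟩]
        constructor
        · intro _; exact Or.inl hix.symm
        · intro _; rfl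
      · rw [if_neg (fun h => hix h.1)]
        constructor
        · exact Or.inr
        · rintro (h | h)
          · exact absurd h.symm hix
          · exact h
    rw [hset]
    simp only [List.exists_mem_cons_iff]
    constructor
    · rintro ((h | h) | h)
      · exact Or.inr (Or.inl h.symm)
      · exact Or.inl h
      · exact Or.inr (Or.inr h)
    · rintro (h | h | h)
      · exact Or.inl (Or.inr h)
      · exact Or.inl (Or.inl h.symm)
      · exact Or.inr h

theorem pairs2_sub : ∀ (l : List Int) (pr : Int × Int), pr ∈ pairs2 l → pr.1 ∈ l ∧ pr.2 ∈ l := by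
  intro l
  induction l with
  | nil => intro pr h; simp [pairs2] at h
  | cons x xs ih =>
    intro pr h
    rcases List.mem_append.mp h with h | h
    · obtain ⟨y, hy, he⟩ := List.mem_map.mp h
      rw [← he]
      exact ⟨List.mem_cons_self .., List.mem_cons_of_mem _ hy⟩
    · obtain ⟨h1, h2⟩ := ih pr h
      exact ⟨List.mem_cons_of_mem _ h1, List.mem_cons_of_mem _ h2⟩

theorem pairs2_cover : ∀ (l : List Int) (x y : Int), x ∈ l → y ∈ l → x ≠ y →
    (x, y) ∈ pairs2 l ∨ (y, x) ∈ pairs2 l := by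
  intro l
  induction l with
  | nil => intro x y hx; simp at hx
  | cons z zs ih =>
    intro x y hx hy hxy
    rcases List.mem_cons.mp hx with h1 | h1
    · subst h1
      have hy' : y ∈ zs := by
        rcases List.mem_cons.mp hy with h2 | h2
        · exact absurd h2.symm hxy
        · exact h2
      exact Or.inl (List.mem_append.mpr (Or.inl (List.mem_map.mpr ⟨y, hy', rfl⟩)))
    · rcases List.mem_cons.mp hy with h2 | h2
      · subst h2
        exact Or.inr (List.mem_append.mpr (Or.inl (List.mem_map.mpr ⟨x, h1, rfl⟩)))
      · rcases ih x y h1 h2 hxy with h | h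
        · exact Or.inl (List.mem_append.mpr (Or.inr h))
        · exact Or.inr (List.mem_append.mpr (Or.inr h))

theorem cast_emod_self {u : Nat} (h : u < 360) : ((u : Int)) % 360 = (u : Int) :=
  Int.emod_eq_of_lt (by positivity) (by exact_mod_cast h)

theorem init_inv (known : List Int) : InvC known (s2F known) := by
  obtain ⟨hlen0, hiff0⟩ := phase0_marks_aux known (List.replicate 360 false) List.length_replicate
  have hp_init : PreInv known (p0F known, ([], known)) := by
    refine ⟨hlen0, ?_, fun a ha => absurd ha List.not_mem_nil,
      fun a ha => absurd ha List.not_mem_nil, ?_, List.nodup_nil, fun x hx => hx⟩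
    · intro i hi
      rw [show (p0F known, ([] : List Int), known).1 = p0F known from rfl]
      unfold p0F
      rw [hiff0 i]
      exact or_iff_right (marked_replicate i)
    · intro a ha
      have := gK_dvd_mem ha
      have h2 : (gK known : Int) ∣ ((rN a : Nat) : Int) := Int.natCast_dvd_natCast.mpr this
      rwa [rN_cast] at h2
  obtain ⟨hp1, he1, hm1⟩ := foldl_diag_pre known hp_init (fun a ha => ha)
  obtain ⟨hp2, he2, hm2⟩ := foldl_pairs_pre (pairs2 (s1F known).2.2) hp1
    (fun pr hpr => pairs2_sub _ pr hpr)
  have heAll : ExtS (p0F known, ([], known)) (s2F known) := ExtS_trans he1 he2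
  refine ⟨hp2, ?_⟩
  intro u v hu hv hmu hmv hnu hnv c hc
  by_cases hmu0 : isMarked (p0F known) u
  · by_cases hmv0 : isMarked (p0F known) v
    · unfold p0F at hmu0 hmv0
      obtain ⟨x, hx, hrx⟩ : ∃ x ∈ known, rN x = u := by
        rcases (hiff0 u).mp hmu0 with h | h
        · exact absurd h (marked_replicate u)
        · exact h
      obtain ⟨y, hy, hry⟩ : ∃ y ∈ known, rN y = v := by
        rcases (hiff0 v).mp hmv0 with h | h
        · exact absurd h (marked_replicate v)
        · exact h
      have hxcast : x % 360 = (u : Int) := by rw [← rN_cast, hrx]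
      have hycast : y % 360 = (v : Int) := by rw [← rN_cast, hry]
      by_cases huv : u = v
      · subst huv
        have hE : combosA x x = combosA (u : Int) (u : Int) := by
          rw [combosA_res x x, hxcast, combosA_res (u : Int) (u : Int),
            cast_emod_self hu]
        rw [← hE] at hc
        exact he2.1 _ (hm1 x hx c hc)
      · have hxy : x ≠ y := by
          intro h
          exact huv (by rw [← hrx, ← hry, h])
        have hx1 : x ∈ (s1F known).2.2 := he1.2.2.1 x hx
        have hy1 : y ∈ (s1F known).2.2 := he1.2.2.1 y hy
        rcases pairs2_cover _ x y hx1 hy1 hxy with hpr | hpr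
        · have hE : combosA x y = combosA (u : Int) (v : Int) := by
            rw [combosA_res x y, hxcast, hycast, combosA_res (u : Int) (v : Int),
              cast_emod_self hu, cast_emod_self hv]
          rw [← hE] at hc
          exact hm2 (x, y) hpr c hc
        · have hcc : c ∈ combosA (v : Int) (u : Int) := combosA_comm hc
          have hE : combosA y x = combosA (v : Int) (u : Int) := by
            rw [combosA_res y x, hxcast, hycast, combosA_res (v : Int) (u : Int),
              cast_emod_self hu, cast_emod_self hv]
          rw [← hE] at hcc
          exact hm2 (y, x) hpr c hcc
    · exact absurd (heAll.2.2.2 v hmv hmv0) hnv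
  · exact absurd (heAll.2.2.2 u hmu hmu0) hnu

-- ---- a closed marked set contains every multiple of the gcd ----

theorem emod_toNat_lt (x : Int) : (x % 360).toNat < 360 := by
  have h1 := Int.emod_lt_of_pos x (show (0:Int) < 360 by norm_num)
  have h2 := Int.emod_nonneg x (show (360:Int) ≠ 0 by norm_num)
  omega

theorem closed_sub {P : List Bool}
    (hCL : ∀ u v : Nat, u < 360 → v < 360 → isMarked P u → isMarked P v →
      ∀ c ∈ combosA u v, isMarked P c.toNat)
    {u v : Nat} (hu : u < 360) (hv : v < 360) (h1 : isMarked P u) (h2 : isMarked P v) :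
    isMarked P ((((u : Int) - v) % 360).toNat) := by
  have hc : PySem.Int.mod (360 + (u : Int) - (v : Int)) 360 ∈ combosA u v := by simp [combosA]
  have hm := hCL u v hu hv h1 h2 _ hc
  rwa [mod360, show (360 : Int) + u - v = 360 + ((u : Int) - v) by ring, emod_add360] at hm

theorem closed_add {P : List Bool}
    (hCL : ∀ u v : Nat, u < 360 → v < 360 → isMarked P u → isMarked P v →
      ∀ c ∈ combosA u v, isMarked P c.toNat)
    {u v : Nat} (hu : u < 360) (hv : v < 360) (h1 : isMarked P u) (h2 : isMarked P v) :
    isMarked P ((((u : Int) + v) % 360).toNat) := by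
  have hc : PySem.Int.mod ((u : Int) + (v : Int)) 360 ∈ combosA u v := by simp [combosA]
  have hm := hCL u v hu hv h1 h2 _ hc
  rwa [mod360] at hm

theorem mark0 {P : List Bool}
    (hCL : ∀ u v : Nat, u < 360 → v < 360 → isMarked P u → isMarked P v →
      ∀ c ∈ combosA u v, isMarked P c.toNat)
    {u : Nat} (hu : u < 360) (h1 : isMarked P u) : isMarked P 0 := by
  have := closed_sub hCL hu hu h1 h1
  simpa using this

theorem markMul {P : List Bool}
    (hCL : ∀ u v : Nat, u < 360 → v < 360 → isMarked P u → isMarked P v →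
      ∀ c ∈ combosA u v, isMarked P c.toNat)
    {u : Nat} (hu : u < 360) (h1 : isMarked P u) :
    ∀ c : Int, isMarked P (((c * u) % 360).toNat) := by
  intro c
  induction c using Int.induction_on with
  | zero => simpa using mark0 hCL hu h1
  | succ n ih =>
    have hb := emod_toNat_lt ((n : Int) * u)
    have h2 := closed_add hCL hb hu ih h1
    have e1 : (((((n : Int) * u) % 360).toNat : Int) + (u : Int)) % 360
        = (((n : Int) + 1) * u) % 360 := by
      rw [Int.toNat_of_nonneg (Int.emod_nonneg _ (by norm_num)), emod_add_absorb_left]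
      ring_nf
    rwa [e1] at h2
  | pred n ih =>
    have hb := emod_toNat_lt ((-(n : Int)) * u)
    have h2 := closed_sub hCL hb hu ih h1
    have e1 : ((((-(n : Int) * u) % 360).toNat : Int) - (u : Int)) % 360
        = ((-(n : Int) - 1) * u) % 360 := by
      rw [Int.toNat_of_nonneg (Int.emod_nonneg _ (by norm_num)), emod_sub_absorb_left]
      ring_nf
    rwa [e1] at h2

theorem good_fold {P : List Bool}
    (hCL : ∀ u v : Nat, u < 360 → v < 360 → isMarked P u → isMarked P v →
      ∀ c ∈ combosA u v, isMarked P c.toNat) :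
    ∀ (l : List Int) (a : Nat), a ∣ 360 →
      (∀ i, i < 360 → a ∣ i → isMarked P i) → (∀ x ∈ l, isMarked P (rN x)) →
      ∀ i, i < 360 → (l.foldl (fun g x => Nat.gcd g (rN x)) a) ∣ i → isMarked P i := by
  intro l
  induction l with
  | nil => exact fun a _ hA _ i hi hd => hA i hi hd
  | cons x l ih =>
    intro a ha hA hx i hi hd
    refine ih (Nat.gcd a (rN x)) (dvd_trans (Nat.gcd_dvd_left _ _) ha) ?_
      (fun y hy => hx y (List.mem_cons_of_mem _ hy)) i hi hd
    intro j hj hdj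
    have hw : isMarked P (rN x) := hx x (List.mem_cons_self ..)
    have hwlt : rN x < 360 := rN_lt x
    -- Bezout: gcd a w = a*A + w*B over ℤ
    have hB := Nat.gcd_eq_gcd_ab a (rN x)
    have hje : Nat.gcd a (rN x) * (j / Nat.gcd a (rN x)) = j := Nat.mul_div_cancel' hdj
    set w := rN x with hwdef
    set t : Int := ((j / Nat.gcd a w : Nat) : Int) with htdef
    set X : Int := t * ((a : Int) * Nat.gcdA a w) with hXdef
    set Y : Int := t * ((w : Int) * Nat.gcdB a w) with hYdef
    have hXY : X + Y = (j : Int) := by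
      rw [hXdef, hYdef, ← mul_add, ← hB, htdef, mul_comm]
      exact_mod_cast congrArg (fun n : Nat => (n : Int)) hje
    have hm1 : isMarked P ((X % 360).toNat) := by
      have hdX : (a : Int) ∣ X := ⟨t * Nat.gcdA a w, by rw [hXdef]; ring⟩
      have hd360 : (a : Int) ∣ 360 := by exact_mod_cast Int.natCast_dvd_natCast.mpr ha
      have hdXm : (a : Int) ∣ X % 360 := dvd_emod360 hd360 hdX
      have hnn : 0 ≤ X % 360 := Int.emod_nonneg _ (by norm_num)
      have : (a : Int) ∣ (((X % 360).toNat : Nat) : Int) := by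
        rwa [Int.toNat_of_nonneg hnn]
      exact hA _ (emod_toNat_lt X) (by exact_mod_cast this)
    have hm2 : isMarked P ((Y % 360).toNat) := by
      have := markMul hCL hwlt hw (t * Nat.gcdB a w)
      rwa [show t * Nat.gcdB a w * (w : Int) = Y by rw [hYdef]; ring] at this
    have h3 := closed_add hCL (emod_toNat_lt X) (emod_toNat_lt Y) hm1 hm2
    have e1 : (((X % 360).toNat : Int) + ((Y % 360).toNat : Int)) % 360 = (j : Int) % 360 := by
      rw [Int.toNat_of_nonneg (Int.emod_nonneg _ (by norm_num)),
        Int.toNat_of_nonneg (Int.emod_nonneg _ (by norm_num)),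
        emod_add_absorb_left, emod_add_absorb_right, hXY]
    rw [e1] at h3
    rwa [cast_emod_self hj, Int.toNat_natCast] at h3

-- ---- final characterisation of A's output, and the verdict ----

theorem final_char (known : List Int) (hne : known ≠ []) :
    (find_all_possible known).length = 360 ∧
    ∀ i, i < 360 → ((find_all_possible known).getD i false = true ↔ gK known ∣ i) := by
  obtain ⟨kn', hp, hcl⟩ := loopA_inv (s2F known) (init_inv known)
  rw [find_eq]
  refine ⟨hp.len, ?_⟩
  intro i hi
  constructor
  · intro hm
    have := isMarked_dvd hp hi hm
    exact_mod_cast this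
  · intro hdvd
    have hCL : ∀ u v : Nat, u < 360 → v < 360 → isMarked (loopA (s2F known)) u →
        isMarked (loopA (s2F known)) v → ∀ c ∈ combosA u v, isMarked (loopA (s2F known)) c.toNat :=
      fun u v hu hv h1 h2 => hcl u v hu hv h1 h2 (by simp) (by simp)
    obtain ⟨x0, hx0⟩ := List.exists_mem_of_ne_nil known hne
    have hres : ∀ x ∈ known, isMarked (loopA (s2F known)) (rN x) := fun x hx =>
      (hp.marks (rN x) (rN_lt x)).mpr ⟨x, hp.orig x hx, rfl⟩
    have h360 : ∀ i, i < 360 → 360 ∣ i → isMarked (loopA (s2F known)) i := by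
      intro i hi hd
      have : i = 0 := by
        rcases Nat.eq_zero_or_pos i with h | h
        · exact h
        · exact absurd (Nat.le_of_dvd h hd) (by omega)
      rw [this]
      exact mark0 hCL (rN_lt x0) (hres x0 hx0)
    exact good_fold hCL known 360 dvd_rfl h360 hres i hi (by rw [← gK_eq]; exact hdvd)

-- ===== VERDICT (by name: the statement is the Claim_ definition above) =====
theorem find_all_possible_spec : Claim_equal_find_all_possible := by
  intro known _ _
  unfold Spec_find_all_possible
  by_cases hne : known = []
  · subst hne
    rw [find_eq]
    rw [show s2F [] = (List.replicate 360 false, (([] : List Int), ([] : List Int))) from rfl]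
    rw [show loopA (List.replicate 360 false, (([] : List Int), ([] : List Int)))
        = List.replicate 360 false from by rw [loopA]]
    rfl
  · obtain ⟨hlen, hchar⟩ := final_char known hne
    show find_all_possible known =
      if known.isEmpty then List.replicate 360 false
      else (List.range 360).map (fun i => decide (i % gK known = 0))
    rw [if_neg (by simpa [List.isEmpty_iff] using hne)]
    apply List.ext_getElem
    · simp [hlen]
    · intro i h1 h2
      simp only [List.getElem_map, List.getElem_range]
      have hi : i < 360 := by omega
      have hch := hchar i hi
      rw [List.getD_eq_getElem _ _ (by omega)] at hch
      by_cases hg : gK known ∣ i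
      · rw [hch.mpr hg]
        simp [Nat.dvd_iff_mod_eq_zero.mp hg]
      · have hF : (find_all_possible known)[i]'(by omega) = false := by
          cases hPi : (find_all_possible known)[i]'(by omega)
          · rfl
          · exact absurd (hch.mp hPi) hg
        rw [hF]
        exact (decide_eq_false (fun h => hg (Nat.dvd_iff_mod_eq_zero.mpr h))).symm
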